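-- pv_equiv track=rewrite | github.com/rMS21ose/LoveCalculatorWeb | app.py | lovecalculator
-- ===== SOURCE A (Python) =====
-- def lovecalculator(name1: str, name2: str) -> int:
--     """Return combined love score as integer (e.g. 53)."""
--     combined_name = (name1 + name2).lower()
--     true_score = 0
--     love_score = 0
--
--     for letter in "amore":
--         true_score += combined_name.count(letter)
--
--     for letter in "love":
--         love_score += combined_name.count(letter)
--
--     # combine as string (not numeric addition) e.g., true=5, love=3 -> 53
--     love_total_score = int(str(true_score) + str(love_score))
--     return love_total_score
-- ===== SOURCE B (Python) =====
-- def lovecalculator(name1: str, name2: str) -> int: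
--     """Return combined love score as integer (e.g. 53)."""
--     combined_name = (name1 + name2).lower()
--     true_score = 0
--     love_score = 0
--     # single pass over the combined name instead of one .count scan per letter
--     for ch in combined_name:
--         if ch in "amore":
--             true_score += 1
--         if ch in "love":
--             love_score += 1
--     return int(str(true_score) + str(love_score))
-- ===== Notes on version B (the rewrite author's own statement) =====
-- stated objective: alternative
-- what changed: B transposes the loops: instead of nine .count scans of the combined name (one per letter of 'amore' and 'love'), it makes a single pass over the combined name's characters, incrementing both counters via membership tests.
import Mathlib
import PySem

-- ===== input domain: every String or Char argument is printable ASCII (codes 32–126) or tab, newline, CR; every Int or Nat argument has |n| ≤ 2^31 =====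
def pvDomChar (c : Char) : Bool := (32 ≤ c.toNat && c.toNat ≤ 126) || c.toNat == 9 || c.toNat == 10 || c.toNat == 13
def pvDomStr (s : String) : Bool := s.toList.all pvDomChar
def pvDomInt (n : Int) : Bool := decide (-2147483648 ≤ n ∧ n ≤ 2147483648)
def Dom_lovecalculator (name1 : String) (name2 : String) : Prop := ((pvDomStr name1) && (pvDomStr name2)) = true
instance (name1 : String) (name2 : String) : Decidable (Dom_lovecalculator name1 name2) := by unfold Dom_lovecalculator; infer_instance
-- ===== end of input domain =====

-- B replaces A's nine .count scans of the combined name (one per letter of "amore"/"love")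
-- by a single pass over its characters with two membership-test counters (objective: alternative).

-- ===== PORT A =====
-- (name1 + name2).lower(), worked on as a list of chars (PySem.Chars.lower is exact .lower())
def lovecalculator (name1 : String) (name2 : String) : Int :=
  let combined : List Char := PySem.Chars.lower (name1.toList ++ name2.toList)
  -- for letter in "amore": true_score += combined_name.count(letter)
  let true_score : Int :=
    ("amore".toList).foldl (fun acc letter => acc + (PySem.Chars.count combined [letter] : Int)) 0
  -- for letter in "love": love_score += combined_name.count(letter)
  let love_score : Int :=
    ("love".toList).foldl (fun acc letter => acc + (PySem.Chars.count combined [letter] : Int)) 0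
  -- int(str(true_score) + str(love_score)); int() never fails on two digit strings, 0 is unreachable
  match PySem.Int.ofChars? (PySem.Int.toChars true_score ++ PySem.Int.toChars love_score) with
  | some v => v
  | none => 0

-- ===== PORT B =====
def lovecalculator_alt (name1 : String) (name2 : String) : Int :=
  let combined : List Char := PySem.Chars.lower (name1.toList ++ name2.toList)
  -- one pass: for ch in combined_name: if ch in "amore": …; if ch in "love": …
  let scores : Int × Int :=
    combined.foldl
      (fun (acc : Int × Int) ch =>
        ((if ("amore".toList).contains ch then acc.1 + 1 else acc.1),
         (if ("love".toList).contains ch then acc.2 + 1 else acc.2)))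
      (0, 0)
  match PySem.Int.ofChars? (PySem.Int.toChars scores.1 ++ PySem.Int.toChars scores.2) with
  | some v => v
  | none => 0

-- ===== PRECONDITION & SPEC =====
def Spec_lovecalculator (name1 : String) (name2 : String) (out : Int) : Prop := out = lovecalculator_alt name1 name2
instance (name1 : String) (name2 : String) (out : Int) : Decidable (Spec_lovecalculator name1 name2 out) := by unfold Spec_lovecalculator; infer_instance

-- ===== CLAIM (what is proved, stated in full; the proofs are below) =====
def Claim_equal_lovecalculator : Prop := ∀ (name1 : String) (name2 : String), Dom_lovecalculator name1 name2 → Spec_lovecalculator name1 name2 (lovecalculator name1 name2)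

-- ===== LEMMAS AND PROOFS =====

-- Chars.count.go on a one-letter pattern, with fuel = length, counts occurrences of that letter
lemma go_singleton (c : Char) : ∀ (l : List Char) (acc : Nat),
    PySem.Chars.count.go [c] l.length l acc = acc + l.count c := by
  intro l
  induction l with
  | nil => intro acc; simp [PySem.Chars.count.go]
  | cons x t ih =>
    intro acc
    rw [List.length_cons, PySem.Chars.count.go]
    by_cases h : x = c
    · simp [h, List.isPrefixOf, ih]; omega
    · simp [List.isPrefixOf, h, ih, Ne.symm h]

lemma count_singleton (l : List Char) (c : Char) : PySem.Chars.count l [c] = l.count c := by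
  simp [PySem.Chars.count, go_singleton]

lemma amore_split (cs : List Char) :
    cs.countP (fun c => (['a','m','o','r','e'] : List Char).contains c)
      = cs.count 'a' + cs.count 'm' + cs.count 'o' + cs.count 'r' + cs.count 'e' := by
  induction cs with
  | nil => rfl
  | cons x t ih =>
    simp only [List.countP_cons, List.count_cons, ih]
    by_cases h1 : x = 'a' <;> by_cases h2 : x = 'm' <;> by_cases h3 : x = 'o' <;>
      by_cases h4 : x = 'r' <;> by_cases h5 : x = 'e' <;> simp_all <;> omega

lemma love_split (cs : List Char) :
    cs.countP (fun c => (['l','o','v','e'] : List Char).contains c)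
      = cs.count 'l' + cs.count 'o' + cs.count 'v' + cs.count 'e' := by
  induction cs with
  | nil => rfl
  | cons x t ih =>
    simp only [List.countP_cons, List.count_cons, ih]
    by_cases h1 : x = 'l' <;> by_cases h2 : x = 'o' <;> by_cases h3 : x = 'v' <;>
      by_cases h5 : x = 'e' <;> simp_all <;> omega

-- ===== VERDICT (by name: the statement is the Claim_ definition above) =====
theorem lovecalculator_spec : Claim_equal_lovecalculator := by
  intro name1 name2 _
  unfold Spec_lovecalculator lovecalculator lovecalculator_alt
  have ha : "amore".toList = ['a','m','o','r','e'] := rfl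
  have hl : "love".toList = ['l','o','v','e'] := rfl
  rw [ha, hl]
  set cs := PySem.Chars.lower (name1.toList ++ name2.toList) with hcs
  have hfold :
      cs.foldl
        (fun (acc : Int × Int) ch =>
          ((if (['a','m','o','r','e'] : List Char).contains ch then acc.1 + 1 else acc.1),
           (if (['l','o','v','e'] : List Char).contains ch then acc.2 + 1 else acc.2)))
        (0, 0)
      = ((cs.countP (fun c => (['a','m','o','r','e'] : List Char).contains c) : Int),
         (cs.countP (fun c => (['l','o','v','e'] : List Char).contains c) : Int)) := by
    refine (PySem.List.foldl_prod_mk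
        (fun (a : Int) ch => if (['a','m','o','r','e'] : List Char).contains ch then a + 1 else a)
        (fun (a : Int) ch => if (['l','o','v','e'] : List Char).contains ch then a + 1 else a)
        cs 0 0).trans ?_
    rw [PySem.List.foldl_if_add_one, PySem.List.foldl_if_add_one]
    simp only [zero_add]
  simp only [List.foldl, count_singleton, hfold]
  have h1 : (0 : Int) + (cs.count 'a' : Int) + (cs.count 'm' : Int) + (cs.count 'o' : Int)
      + (cs.count 'r' : Int) + (cs.count 'e' : Int)
      = ((cs.countP (fun c => (['a','m','o','r','e'] : List Char).contains c) : Int)) := by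
    rw [amore_split]; push_cast; ring
  have h2 : (0 : Int) + (cs.count 'l' : Int) + (cs.count 'o' : Int) + (cs.count 'v' : Int)
      + (cs.count 'e' : Int)
      = ((cs.countP (fun c => (['l','o','v','e'] : List Char).contains c) : Int)) := by
    rw [love_split]; push_cast; ring
  rw [h1, h2]
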